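-- pv_equiv track=rewrite | github.com/wokii/practice | deepest_pit.py | deepest_pit
-- ===== SOURCE A (Python) =====
-- def deepest_pit(A):
--     # write your code in Python 3.6
--     size = len(A)
--
--     if size < 3:
--         return -1
--     #bool increasing represents the previous changing trend, increasing (True) or decreasing (False)
--     increasing = True
--     #turnpoint is a point when it's a local min/max or it's value is equal to the value of point that is before it
--     #turnpoint is reset when current increasing/decreasing trend changes, or the value of current point is equal to that of the point before it.
--     turnpoint = 0
--
--     #decrease represents the value that has been decreased (distance between A[turnpoint] and current point which is i-1)
--     decrease = 0
--
--     #return value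
--     rtn = 0
--     for i in range(1, size):
--         #strictly increasing
--
--         if A[i] == A[i - 1]:
--             #reset, since strict monotone is required
--             turnpoint = i - 1
--             decrease = 0
--             increasing = True
--             if not increasing:
--                 #then abandon all values and start next iteration
--                 continue
--
--
--         else:
--             #state represents if the current step is increasing (True) or decreasing (False)
--             state = A[i] > A[i-1]
--             if state != increasing:
--                 increasing = state
--                 decrease = A[turnpoint] - A[i - 1] if increasing else 0
--                 turnpoint = i - 1
--
--         rtn = max(rtn, min(A[i] - A[turnpoint], decrease))
--     return -1 if rtn == 0 else rtn
-- ===== SOURCE B (Python) =====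
-- def deepest_pit(A):
--     # Run-length encode the signs of consecutive differences, then scan
--     # adjacent (fall, rise) run pairs for the deepest pit.
--     if len(A) < 3:
--         return -1
--     runs = []  # (sign, magnitude) of maximal runs of same-sign differences
--     for prev, cur in zip(A, A[1:]):
--         d = cur - prev
--         s = (d > 0) - (d < 0)
--         if runs and runs[-1][0] == s and s != 0:
--             runs[-1] = (s, runs[-1][1] + abs(d))
--         else:
--             runs.append((s, abs(d)))
--     best = 0
--     for fall, rise in zip(runs, runs[1:]):
--         if fall[0] == -1 and rise[0] == 1:
--             best = max(best, min(fall[1], rise[1]))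
--     return best if best != 0 else -1
-- ===== Notes on version B (the rewrite author's own statement) =====
-- stated objective: alternative
-- what changed: Instead of A's single-pass state machine over indices (increasing/turnpoint/decrease flags with plateau resets), B run-length encodes the signs of consecutive differences into maximal (sign, magnitude) runs and then scans adjacent run pairs, taking max over min(fall, rise) for every fall-run immediately followed by a rise-run.
import Mathlib
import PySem

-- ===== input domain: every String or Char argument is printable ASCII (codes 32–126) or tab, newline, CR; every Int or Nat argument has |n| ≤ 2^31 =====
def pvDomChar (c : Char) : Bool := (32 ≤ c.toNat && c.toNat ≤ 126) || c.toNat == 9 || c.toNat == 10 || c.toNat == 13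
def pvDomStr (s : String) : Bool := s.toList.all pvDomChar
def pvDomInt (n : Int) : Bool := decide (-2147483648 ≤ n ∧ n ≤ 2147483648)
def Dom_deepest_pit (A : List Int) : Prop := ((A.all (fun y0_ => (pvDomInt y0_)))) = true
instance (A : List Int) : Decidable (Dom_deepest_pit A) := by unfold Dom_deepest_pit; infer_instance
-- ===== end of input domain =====

-- B re-implements the same exact result by run-length encoding the signs of consecutive
-- differences and scanning adjacent (fall, rise) run pairs; same O(n) cost ("alternative").

-- ===== PORT A =====
-- A's loop body: state = (increasing, turnpoint, decrease, rtn); the source's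
-- 'if not increasing: continue' right after setting increasing = True is unreachable.
def pvStepA (A : List Int) (s : Bool × Int × Int × Int) (i : Int) : Bool × Int × Int × Int :=
  let ai := PySem.List.pyGetD A i 0
  let ap := PySem.List.pyGetD A (i - 1) 0
  let inc := s.1
  let tp := s.2.1
  let dec := s.2.2.1
  let rtn := s.2.2.2
  if ai = ap then
    -- plateau reset: turnpoint = i-1, decrease = 0, increasing = True
    (true, i - 1, 0, max rtn (min (ai - ap) 0))
  else
    let state := decide (ap < ai)
    let inc' := if state ≠ inc then state else inc
    let dec' := if state ≠ inc then (if state then PySem.List.pyGetD A tp 0 - ap else 0) else dec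
    let tp'  := if state ≠ inc then i - 1 else tp
    (inc', tp', dec', max rtn (min (ai - PySem.List.pyGetD A tp' 0) dec'))

def deepest_pit (A : List Int) : Int :=
  let size : Int := A.length
  if size < 3 then -1
  else
    let s := (PySem.List.pyRange 1 size 1).foldl (pvStepA A) (true, 0, 0, 0)
    if s.2.2.2 = 0 then -1 else s.2.2.2

-- ===== PORT B =====
-- one step of building the run list: merge into the last run if same nonzero sign
def pvRunStep (runs : List (Int × Int)) (p : Int × Int) : List (Int × Int) :=
  let d := p.2 - p.1
  let s : Int := (if 0 < d then 1 else 0) - (if d < 0 then 1 else 0)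
  match runs.getLast? with
  | some (s0, m) =>
      if s0 = s ∧ s ≠ 0 then runs.dropLast ++ [(s, m + |d|)]
      else runs ++ [(s, |d|)]
  | none => runs ++ [(s, |d|)]

-- one step of the adjacent-pair scan: a fall run immediately followed by a rise run is a pit
def pvBStep (b : Int) (pr : (Int × Int) × (Int × Int)) : Int :=
  if pr.1.1 = -1 ∧ pr.2.1 = 1 then max b (min pr.1.2 pr.2.2) else b

def deepest_pit_alt (A : List Int) : Int :=
  if (A.length : Int) < 3 then -1
  else
    let runs := (A.zip A.tail).foldl pvRunStep []
    let best := (runs.zip runs.tail).foldl pvBStep 0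
    if best ≠ 0 then best else -1

-- ===== PRECONDITION & SPEC =====
def Spec_deepest_pit (A : List Int) (out : Int) : Prop := out = deepest_pit_alt A
instance (A : List Int) (out : Int) : Decidable (Spec_deepest_pit A out) := by unfold Spec_deepest_pit; infer_instance

-- ===== CLAIM (what is proved, stated in full; the proofs are below) =====
def Claim_equal_deepest_pit : Prop := ∀ (A : List Int), Dom_deepest_pit A → Spec_deepest_pit A (deepest_pit A)

-- ===== LEMMAS AND PROOFS =====

-- cons-ordered (most recent run first) version of pvRunStep, used only in proofs
def pvRunStepC (runs : List (Int × Int)) (p : Int × Int) : List (Int × Int) :=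
  let d := p.2 - p.1
  let s : Int := (if 0 < d then 1 else 0) - (if d < 0 then 1 else 0)
  match runs with
  | (s0, m) :: t => if s0 = s ∧ s ≠ 0 then (s, m + |d|) :: t else (s, |d|) :: (s0, m) :: t
  | [] => [(s, |d|)]

lemma runStep_rev (R : List (Int × Int)) (p : Int × Int) :
    pvRunStep R p = (pvRunStepC R.reverse p).reverse := by
  rcases hR : R.reverse with _ | ⟨⟨s0, m⟩, t⟩
  · have h : R = [] := by simpa using congrArg List.reverse hR
    subst h; simp [pvRunStep, pvRunStepC]
  · have h : R = t.reverse ++ [(s0, m)] := by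
      have := congrArg List.reverse hR; simpa using this
    subst h
    simp only [pvRunStepC, pvRunStep, List.getLast?_concat, List.dropLast_concat]
    split_ifs <;> simp

lemma foldl_runStep_rev (l : List (Int × Int)) :
    ∀ R, l.foldl pvRunStep R = (l.foldl pvRunStepC R.reverse).reverse := by
  induction l with
  | nil => intro R; simp
  | cons p l ih =>
      intro R
      simp only [List.foldl_cons]
      rw [runStep_rev, ih, List.reverse_reverse]

-- recursive form of the adjacent-pair scan
def pvScan : Int → List (Int × Int) → Int
  | b, p :: q :: t => pvScan (pvBStep b (p, q)) (q :: t)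
  | b, _ => b

lemma zipfold_eq_scan : ∀ (R : List (Int × Int)) (b : Int),
    (R.zip R.tail).foldl pvBStep b = pvScan b R := by
  intro R
  induction R with
  | nil => intro b; simp [pvScan]
  | cons p t ih =>
      intro b
      cases t with
      | nil => simp [pvScan]
      | cons q t' =>
          simp only [List.tail_cons, List.zip_cons_cons, List.foldl_cons]
          exact ih (pvBStep b (p, q))

lemma scan_snoc : ∀ (l : List (Int × Int)) (b : Int) (x : Int × Int),
    pvScan b (l ++ [x]) =
      (match l.getLast? with
       | none => b
       | some y => pvBStep (pvScan b l) (y, x)) := by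
  intro l
  induction l with
  | nil => intro b x; simp [pvScan]
  | cons a t ih =>
      intro b x
      cases t with
      | nil => simp [pvScan]
      | cons q t' =>
          simp only [List.cons_append, pvScan, List.getLast?_cons_cons]
          exact ih (pvBStep b (a, q)) x

-- the scan applied to the cons-ordered run list
def pvBestRev (C : List (Int × Int)) : Int := pvScan 0 C.reverse

lemma bestRev_single (x : Int × Int) : pvBestRev [x] = 0 := by simp [pvBestRev, pvScan]

lemma bestRev_cons (x y : Int × Int) (C : List (Int × Int)) :
    pvBestRev (x :: y :: C) = pvBStep (pvBestRev (y :: C)) (y, x) := by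
  unfold pvBestRev
  simp only [List.reverse_cons, List.append_assoc, List.singleton_append]
  rw [show C.reverse ++ [y, x] = (C.reverse ++ [y]) ++ [x] by simp]
  rw [scan_snoc]
  simp

-- indexing lemmas
lemma pvGet_mid (xs t : List Int) (y : Int) :
    PySem.List.pyGetD (xs ++ y :: t) (xs.length : Int) 0 = y := by
  rw [PySem.List.pyGetD_natCast]
  simp [List.getD]

lemma pvGet_mid2 (xs t : List Int) (y z : Int) :
    PySem.List.pyGetD (xs ++ y :: z :: t) ((xs.length : Int) + 1) 0 = z := by
  have h : ((xs.length : Int) + 1) = ((xs.length + 1 : Nat) : Int) := by push_cast; ring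
  rw [h, PySem.List.pyGetD_natCast]
  simp only [List.getD]
  rw [List.getElem?_append_right (by omega)]
  have h2 : xs.length + 1 - xs.length = 1 := by omega
  rw [h2]; rfl

lemma pvGet_stable (xs t : List Int) (y : Int) (tp : Int) (h0 : 0 ≤ tp)
    (h1 : tp ≤ (xs.length : Int)) :
    PySem.List.pyGetD (xs ++ y :: t) tp 0 = PySem.List.pyGetD (xs ++ [y]) tp 0 := by
  obtain ⟨n, rfl⟩ : ∃ n : Nat, tp = (n : Int) := ⟨tp.toNat, (Int.toNat_of_nonneg h0).symm⟩
  rw [PySem.List.pyGetD_natCast, PySem.List.pyGetD_natCast]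
  have hn : n ≤ xs.length := by exact_mod_cast h1
  rw [show xs ++ y :: t = (xs ++ [y]) ++ t by simp]
  simp only [List.getD]
  rw [List.getElem?_append_left (by simp; omega)]

-- magnitude of the fall run at the head, if any
def pvFall (C : List (Int × Int)) : Int :=
  match C.head? with
  | some (t, f) => if t = -1 then f else 0
  | none => 0

-- value at A[turnpoint], which always lies within done ++ [prev]
def pvTv (done : List Int) (prev : Int) (tp : Int) : Int :=
  PySem.List.pyGetD (done ++ [prev]) tp 0

-- invariant tying A's loop state after scanning done ++ [prev] to the cons-ordered run list C
def pvInv (done : List Int) (prev : Int) (inc : Bool) (tp dec rtn : Int)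
    (C : List (Int × Int)) : Prop :=
  0 ≤ rtn ∧ rtn = pvBestRev C ∧ 0 ≤ tp ∧ tp ≤ (done.length : Int) ∧
  (match C with
   | [] => done = [] ∧ inc = true ∧ dec = 0 ∧ tp = 0
   | (s, m) :: C' =>
       (s = 1 → inc = true ∧ 0 < m ∧ pvTv done prev tp = prev - m ∧ dec = pvFall C' ∧ 0 ≤ dec)
     ∧ (s = -1 → inc = false ∧ 0 < m ∧ pvTv done prev tp = prev + m ∧ dec = 0)
     ∧ (s = 0 → inc = true ∧ m = 0 ∧ pvTv done prev tp = prev ∧ dec = 0)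
     ∧ (s = 1 ∨ s = -1 ∨ s = 0))

-- A[turnpoint] is unchanged when the scanned prefix grows
lemma tv_stable (done : List Int) (prev c tp : Int) (h0 : 0 ≤ tp)
    (h1 : tp ≤ (done.length : Int)) :
    pvTv (done ++ [prev]) c tp = pvTv done prev tp := by
  unfold pvTv
  rw [show (done ++ [prev]) ++ [c] = done ++ prev :: [c] by simp]
  exact pvGet_stable done [c] prev tp h0 h1

lemma tv_last (done : List Int) (prev c : Int) :
    pvTv (done ++ [prev]) c (done.length : Int) = prev := by
  unfold pvTv
  rw [show (done ++ [prev]) ++ [c] = done ++ prev :: [c] by simp]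
  exact pvGet_mid done [c] prev

lemma pvLoop : ∀ (rest done : List Int) (prev : Int) (inc : Bool) (tp dec rtn : Int)
    (C : List (Int × Int)), pvInv done prev inc tp dec rtn C →
    ((PySem.List.pyRange ((done.length : Int) + 1) (((done ++ prev :: rest).length : Int)) 1).foldl
        (pvStepA (done ++ prev :: rest)) (inc, tp, dec, rtn)).2.2.2
      = pvBestRev (((prev :: rest).zip rest).foldl pvRunStepC C) := by
  intro rest
  induction rest with
  | nil =>
      intro done prev inc tp dec rtn C hInv
      rw [PySem.List.pyRange_one_eq_nil (by simp)]
      simp only [List.foldl_nil, List.zip_nil_right]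
      exact hInv.2.1
  | cons c rest' ih =>
      intro done prev inc tp dec rtn C hInv
      obtain ⟨hrtn0, hrtnC, htp0, htpLen, hC⟩ := hInv
      rw [PySem.List.pyRange_one_cons (by simp only [List.length_append, List.length_cons]; push_cast; omega)]
      rw [List.foldl_cons]
      have hAi : PySem.List.pyGetD (done ++ prev :: c :: rest') ((done.length : Int) + 1) 0 = c :=
        pvGet_mid2 done rest' prev c
      have hAp : PySem.List.pyGetD (done ++ prev :: c :: rest') ((done.length : Int) + 1 - 1) 0 = prev := by
        rw [show (done.length : Int) + 1 - 1 = (done.length : Int) by ring]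
        exact pvGet_mid done (c :: rest') prev
      have hAtp : PySem.List.pyGetD (done ++ prev :: c :: rest') tp 0 = pvTv done prev tp :=
        pvGet_stable done (c :: rest') prev tp htp0 htpLen
      simp only [List.zip_cons_cons, List.foldl_cons]
      have hshape : (done ++ [prev]) ++ c :: rest' = done ++ prev :: c :: rest' := by simp
      have hlen1 : ((done ++ [prev]).length : Int) = (done.length : Int) + 1 := by simp
      have htp0' : (0 : Int) ≤ (done.length : Int) := Int.natCast_nonneg _
      have htpLen' : (done.length : Int) ≤ ((done ++ [prev]).length : Int) := by rw [hlen1]; omega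
      rcases lt_trichotomy c prev with hLt | hEq | hGt
      · -- ===== strict fall =====
        have hne : ¬ (c = prev) := by omega
        have hdneg : ¬ (0 < c - prev) := by omega
        have hdneg' : c - prev < 0 := by omega
        have habs : |c - prev| = prev - c := by rw [abs_of_neg hdneg']; ring
        have hpc : ¬ prev < c := not_lt.mpr (le_of_lt hLt)
        cases hCs : C with
        | nil =>
            obtain ⟨hdone, hinc, hdec, htp⟩ : done = [] ∧ inc = true ∧ dec = 0 ∧ tp = 0 := by
              rw [hCs] at hC; exact hC
            subst hdone hinc hdec htp
            have hrtn : rtn = 0 := by rw [hCs] at hrtnC; simpa [pvBestRev, pvScan] using hrtnC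
            subst hrtn
            have hst : pvStepA ([] ++ prev :: c :: rest') (true, 0, 0, 0) (((([] : List Int)).length : Int) + 1)
                = (false, (([] : List Int).length : Int), 0, 0) := by
              simp only [pvStepA, hAi, hAp]
              rw [if_neg hne]
              rw [show decide (prev < c) = false from by simp [not_lt.mpr (le_of_lt hLt)]]
              simp only [ne_eq, Bool.false_eq_true, not_false_eq_true, if_true, if_false,
                Bool.false_eq_true]
              have h1 : min (c - prev) 0 = c - prev := by omega
              have h2 : max 0 (c - prev) = 0 := by omega
              simp [h1, h2]
            rw [hst]
            have hrc : pvRunStepC ([] : List (Int × Int)) (prev, c) = [(-1, prev - c)] := by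
              simp [pvRunStepC, hpc, hLt, habs]
            rw [hrc]
            have hnew : pvInv ([] ++ [prev]) c false (([] : List Int).length : Int) 0 0 [(-1, prev - c)] := by
              refine ⟨le_refl 0, (bestRev_single _).symm, htp0', htpLen', ?_, ?_, ?_, ?_⟩
              · intro h; exact absurd h (by norm_num)
              · intro _
                refine ⟨rfl, by omega, ?_, rfl⟩
                rw [tv_last]; ring
              · intro h; exact absurd h (by norm_num)
              · exact Or.inr (Or.inl rfl)
            have key := ih ([] ++ [prev]) c false (([] : List Int).length : Int) 0 0 [(-1, prev - c)] hnew
            rw [hshape, hlen1] at key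
            exact key
        | cons hd C' =>
            obtain ⟨s, m⟩ := hd
            rw [hCs] at hC hrtnC
            obtain ⟨hS1, hSm1, hS0, hSor⟩ := hC
            rcases hSor with hs | hs | hs
            · -- fall after a rise run: trend switch
              subst hs
              obtain ⟨hinc, hm, htv, hdec, hdec0⟩ := hS1 rfl
              subst hinc
              have hst : pvStepA (done ++ prev :: c :: rest') (true, tp, dec, rtn) ((done.length : Int) + 1)
                  = (false, (done.length : Int), 0, rtn) := by
                simp only [pvStepA, hAi, hAp, hAtp]
                rw [if_neg hne]
                rw [show decide (prev < c) = false from by simp [not_lt.mpr (le_of_lt hLt)]]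
                simp only [ne_eq, Bool.false_eq_true, not_false_eq_true, if_true, if_false]
                have h1 : min (c - prev) 0 = c - prev := by omega
                have h2 : max rtn (c - prev) = rtn := by omega
                have h3 : (done.length : Int) + 1 - 1 = (done.length : Int) := by ring
                rw [hAp, h3, h1, h2]
              rw [hst]
              have hrc : pvRunStepC ((1, m) :: C') (prev, c) = (-1, prev - c) :: (1, m) :: C' := by
                simp [pvRunStepC, hpc, hLt, habs]
              rw [hrc]
              have hnew : pvInv (done ++ [prev]) c false ((done.length : Int)) 0 rtn
                  ((-1, prev - c) :: (1, m) :: C') := by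
                refine ⟨hrtn0, ?_, htp0', htpLen', ?_, ?_, ?_, ?_⟩
                · rw [bestRev_cons, show pvBStep (pvBestRev ((1, m) :: C')) ((1, m), (-1, prev - c))
                      = pvBestRev ((1, m) :: C') from by simp [pvBStep]]
                  exact hrtnC
                · intro h; exact absurd h (by norm_num)
                · intro _
                  refine ⟨rfl, by omega, ?_, rfl⟩
                  rw [tv_last]; ring
                · intro h; exact absurd h (by norm_num)
                · exact Or.inr (Or.inl rfl)
              have key := ih (done ++ [prev]) c false ((done.length : Int)) 0 rtn
                ((-1, prev - c) :: (1, m) :: C') hnew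
              rw [hshape, hlen1] at key
              exact key
            · -- fall continuing a fall run: merge
              subst hs
              obtain ⟨hinc, hm, htv, hdec⟩ := hSm1 rfl
              subst hinc hdec
              have hst : pvStepA (done ++ prev :: c :: rest') (false, tp, 0, rtn) ((done.length : Int) + 1)
                  = (false, tp, 0, rtn) := by
                simp only [pvStepA, hAi, hAp, hAtp]
                rw [if_neg hne]
                rw [show decide (prev < c) = false from by simp [not_lt.mpr (le_of_lt hLt)]]
                simp only [ne_eq, not_true_eq_false, if_false]
                rw [hAtp, htv]
                have h1 : min (c - (prev + m)) 0 = c - (prev + m) := by omega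
                have h2 : max rtn (c - (prev + m)) = rtn := by omega
                rw [h1, h2]
              rw [hst]
              have hrc : pvRunStepC ((-1, m) :: C') (prev, c) = (-1, m + (prev - c)) :: C' := by
                simp [pvRunStepC, hpc, hLt, habs]
              rw [hrc]
              have hnew : pvInv (done ++ [prev]) c false tp 0 rtn ((-1, m + (prev - c)) :: C') := by
                refine ⟨hrtn0, ?_, htp0, le_trans htpLen (by rw [hlen1]; omega), ?_, ?_, ?_, ?_⟩
                · cases C' with
                  | nil =>
                      rw [bestRev_single]
                      rw [show pvBestRev [((-1 : Int), m)] = 0 from bestRev_single _] at hrtnC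
                      exact hrtnC
                  | cons y C'' =>
                      rw [bestRev_cons, show pvBStep (pvBestRev (y :: C'')) (y, (-1, m + (prev - c)))
                          = pvBestRev (y :: C'') from by simp [pvBStep]]
                      rw [bestRev_cons, show pvBStep (pvBestRev (y :: C'')) (y, ((-1 : Int), m))
                          = pvBestRev (y :: C'') from by simp [pvBStep]] at hrtnC
                      exact hrtnC
                · intro h; exact absurd h (by norm_num)
                · intro _
                  refine ⟨rfl, by omega, ?_, rfl⟩
                  rw [tv_stable done prev c tp htp0 htpLen, htv]; ring
                · intro h; exact absurd h (by norm_num)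
                · exact Or.inr (Or.inl rfl)
              have key := ih (done ++ [prev]) c false tp 0 rtn ((-1, m + (prev - c)) :: C') hnew
              rw [hshape, hlen1] at key
              exact key
            · -- fall after a plateau: trend switch
              subst hs
              obtain ⟨hinc, hm, htv, hdec⟩ := hS0 rfl
              subst hinc hdec
              have hst : pvStepA (done ++ prev :: c :: rest') (true, tp, 0, rtn) ((done.length : Int) + 1)
                  = (false, (done.length : Int), 0, rtn) := by
                simp only [pvStepA, hAi, hAp, hAtp]
                rw [if_neg hne]
                rw [show decide (prev < c) = false from by simp [not_lt.mpr (le_of_lt hLt)]]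
                simp only [ne_eq, Bool.false_eq_true, not_false_eq_true, if_true, if_false]
                have h1 : min (c - prev) 0 = c - prev := by omega
                have h2 : max rtn (c - prev) = rtn := by omega
                have h3 : (done.length : Int) + 1 - 1 = (done.length : Int) := by ring
                rw [hAp, h3, h1, h2]
              rw [hst]
              have hrc : pvRunStepC ((0, m) :: C') (prev, c) = (-1, prev - c) :: (0, m) :: C' := by
                simp [pvRunStepC, hpc, hLt, habs]
              rw [hrc]
              have hnew : pvInv (done ++ [prev]) c false ((done.length : Int)) 0 rtn
                  ((-1, prev - c) :: (0, m) :: C') := by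
                refine ⟨hrtn0, ?_, htp0', htpLen', ?_, ?_, ?_, ?_⟩
                · rw [bestRev_cons, show pvBStep (pvBestRev ((0, m) :: C')) ((0, m), (-1, prev - c))
                      = pvBestRev ((0, m) :: C') from by simp [pvBStep]]
                  exact hrtnC
                · intro h; exact absurd h (by norm_num)
                · intro _
                  refine ⟨rfl, by omega, ?_, rfl⟩
                  rw [tv_last]; ring
                · intro h; exact absurd h (by norm_num)
                · exact Or.inr (Or.inl rfl)
              have key := ih (done ++ [prev]) c false ((done.length : Int)) 0 rtn
                ((-1, prev - c) :: (0, m) :: C') hnew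
              rw [hshape, hlen1] at key
              exact key
      · -- ===== plateau =====
        have hst : pvStepA (done ++ prev :: c :: rest') (inc, tp, dec, rtn) ((done.length : Int) + 1)
            = (true, (done.length : Int), 0, rtn) := by
          simp only [pvStepA, hAi, hAp]
          rw [if_pos hEq]
          have h1 : min (c - prev) 0 = 0 := by omega
          have h2 : max rtn 0 = rtn := by omega
          have h3 : (done.length : Int) + 1 - 1 = (done.length : Int) := by ring
          rw [h1, h2, h3]
        rw [hst]
        have hd0 : c - prev = 0 := by omega
        have hrc : pvRunStepC C (prev, c) = (0, 0) :: C := by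
          cases C with
          | nil => simp [pvRunStepC, hEq]
          | cons hd tl =>
              obtain ⟨s0, m0⟩ := hd
              simp [pvRunStepC, hEq]
        rw [hrc]
        have hnew : pvInv (done ++ [prev]) c true ((done.length : Int)) 0 rtn ((0, 0) :: C) := by
          refine ⟨hrtn0, ?_, htp0', htpLen', ?_, ?_, ?_, ?_⟩
          · cases C with
            | nil =>
                rw [bestRev_single]
                simpa [pvBestRev, pvScan] using hrtnC
            | cons y C'' =>
                rw [bestRev_cons, show pvBStep (pvBestRev (y :: C'')) (y, ((0 : Int), (0 : Int)))
                    = pvBestRev (y :: C'') from by simp [pvBStep]]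
                exact hrtnC
          · intro h; exact absurd h (by norm_num)
          · intro h; exact absurd h (by norm_num)
          · intro _
            refine ⟨rfl, rfl, ?_, rfl⟩
            rw [tv_last]; omega
          · exact Or.inr (Or.inr rfl)
        have key := ih (done ++ [prev]) c true ((done.length : Int)) 0 rtn ((0, 0) :: C) hnew
        rw [hshape, hlen1] at key
        exact key
      · -- ===== strict rise =====
        have hne : ¬ (c = prev) := by omega
        have hdpos : 0 < c - prev := by omega
        have hdpos' : ¬ (c - prev < 0) := by omega
        have habs : |c - prev| = c - prev := abs_of_pos hdpos
        have hcp : ¬ c < prev := not_lt.mpr (le_of_lt hGt)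
        cases hCs : C with
        | nil =>
            obtain ⟨hdone, hinc, hdec, htp⟩ : done = [] ∧ inc = true ∧ dec = 0 ∧ tp = 0 := by
              rw [hCs] at hC; exact hC
            subst hdone hinc hdec htp
            have hrtn : rtn = 0 := by rw [hCs] at hrtnC; simpa [pvBestRev, pvScan] using hrtnC
            subst hrtn
            have htv0 : pvTv [] prev 0 = prev := pvGet_mid [] [] prev
            have hst : pvStepA ([] ++ prev :: c :: rest') (true, 0, 0, 0) ((([] : List Int).length : Int) + 1)
                = (true, 0, 0, 0) := by
              simp only [pvStepA, hAi, hAp, hAtp]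
              rw [if_neg hne]
              rw [show decide (prev < c) = true from by simp [hGt]]
              simp only [ne_eq, not_true_eq_false, if_false]
              rw [hAtp, htv0]
              have h1 : min (c - prev) 0 = 0 := by omega
              have h2 : max 0 (0 : Int) = 0 := by omega
              rw [h1, h2]
            rw [hst]
            have hrc : pvRunStepC ([] : List (Int × Int)) (prev, c) = [(1, c - prev)] := by
              simp [pvRunStepC, hGt, hcp, habs]
            rw [hrc]
            have hnew : pvInv ([] ++ [prev]) c true 0 0 0 [(1, c - prev)] := by
              refine ⟨le_refl 0, (bestRev_single _).symm, le_refl 0, by simp, ?_, ?_, ?_, ?_⟩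
              · intro _
                refine ⟨rfl, by omega, ?_, rfl, le_refl 0⟩
                have : pvTv ([] ++ [prev]) c 0 = prev := by
                  rw [show ((0 : Int)) = ((([] : List Int).length : Int)) from by simp]
                  exact tv_last [] prev c
                rw [this]; ring
              · intro h; exact absurd h (by norm_num)
              · intro h; exact absurd h (by norm_num)
              · exact Or.inl rfl
            have key := ih ([] ++ [prev]) c true 0 0 0 [(1, c - prev)] hnew
            rw [hshape, hlen1] at key
            exact key
        | cons hd C' =>
            obtain ⟨s, m⟩ := hd
            rw [hCs] at hC hrtnC
            obtain ⟨hS1, hSm1, hS0, hSor⟩ := hC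
            rcases hSor with hs | hs | hs
            · -- rise continuing a rise run: merge
              subst hs
              obtain ⟨hinc, hm, htv, hdec, hdec0⟩ := hS1 rfl
              subst hinc
              have hst : pvStepA (done ++ prev :: c :: rest') (true, tp, dec, rtn) ((done.length : Int) + 1)
                  = (true, tp, dec, max rtn (min (m + (c - prev)) dec)) := by
                simp only [pvStepA, hAi, hAp, hAtp]
                rw [if_neg hne]
                rw [show decide (prev < c) = true from by simp [hGt]]
                simp only [ne_eq, not_true_eq_false, if_false]
                rw [hAtp, htv]
                have h1 : c - (prev - m) = m + (c - prev) := by ring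
                rw [h1]
              rw [hst]
              have hrc : pvRunStepC ((1, m) :: C') (prev, c) = (1, m + (c - prev)) :: C' := by
                simp [pvRunStepC, hGt, hcp, habs]
              rw [hrc]
              have hnew : pvInv (done ++ [prev]) c true tp dec
                  (max rtn (min (m + (c - prev)) dec)) ((1, m + (c - prev)) :: C') := by
                refine ⟨by omega, ?_, htp0, le_trans htpLen (by rw [hlen1]; omega), ?_, ?_, ?_, ?_⟩
                · cases hC's : C' with
                  | nil =>
                      rw [bestRev_single]
                      rw [hC's] at hrtnC hdec
                      rw [show pvBestRev [((1 : Int), m)] = 0 from bestRev_single _] at hrtnC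
                      have hdec' : dec = 0 := by simpa [pvFall] using hdec
                      omega
                  | cons y C'' =>
                      obtain ⟨t, f⟩ := y
                      rw [hC's] at hrtnC hdec
                      rw [bestRev_cons] at hrtnC ⊢
                      by_cases ht : t = -1
                      · subst ht
                        have hdec' : dec = f := by simpa [pvFall] using hdec
                        subst hdec'
                        simp only [pvBStep] at hrtnC ⊢
                        norm_num at hrtnC ⊢
                        omega
                      · have hdec' : dec = 0 := by simpa [pvFall, ht] using hdec
                        subst hdec'
                        rw [show pvBStep (pvBestRev ((t, f) :: C'')) ((t, f), (1, m + (c - prev)))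
                            = pvBestRev ((t, f) :: C'') from by simp [pvBStep, ht]]
                        rw [show pvBStep (pvBestRev ((t, f) :: C'')) ((t, f), ((1 : Int), m))
                            = pvBestRev ((t, f) :: C'') from by simp [pvBStep, ht]] at hrtnC
                        omega
                · intro _
                  refine ⟨rfl, by omega, ?_, hdec, hdec0⟩
                  rw [tv_stable done prev c tp htp0 htpLen, htv]; ring
                · intro h; exact absurd h (by norm_num)
                · intro h; exact absurd h (by norm_num)
                · exact Or.inl rfl
              have key := ih (done ++ [prev]) c true tp dec
                (max rtn (min (m + (c - prev)) dec)) ((1, m + (c - prev)) :: C') hnew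
              rw [hshape, hlen1] at key
              exact key
            · -- rise after a fall run: trend switch, this is where a pit closes
              subst hs
              obtain ⟨hinc, hm, htv, hdec⟩ := hSm1 rfl
              subst hinc hdec
              have hst : pvStepA (done ++ prev :: c :: rest') (false, tp, 0, rtn) ((done.length : Int) + 1)
                  = (true, (done.length : Int), m, max rtn (min (c - prev) m)) := by
                simp only [pvStepA, hAi, hAp, hAtp]
                rw [if_neg hne]
                rw [show decide (prev < c) = true from by simp [hGt]]
                simp only [ne_eq, Bool.true_eq_false, not_false_eq_true, if_true]
                have h3 : (done.length : Int) + 1 - 1 = (done.length : Int) := by ring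
                rw [htv, hAp, h3]
                have h1 : prev + m - prev = m := by ring
                rw [h1]
              rw [hst]
              have hrc : pvRunStepC ((-1, m) :: C') (prev, c) = (1, c - prev) :: (-1, m) :: C' := by
                simp [pvRunStepC, hGt, hcp, habs]
              rw [hrc]
              have hnew : pvInv (done ++ [prev]) c true ((done.length : Int)) m
                  (max rtn (min (c - prev) m)) ((1, c - prev) :: (-1, m) :: C') := by
                refine ⟨by omega, ?_, htp0', htpLen', ?_, ?_, ?_, ?_⟩
                · rw [bestRev_cons]
                  simp only [pvBStep]
                  norm_num
                  omega
                · intro _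
                  refine ⟨rfl, by omega, ?_, ?_, by omega⟩
                  · rw [tv_last]; ring
                  · simp [pvFall]
                · intro h; exact absurd h (by norm_num)
                · intro h; exact absurd h (by norm_num)
                · exact Or.inl rfl
              have key := ih (done ++ [prev]) c true ((done.length : Int)) m
                (max rtn (min (c - prev) m)) ((1, c - prev) :: (-1, m) :: C') hnew
              rw [hshape, hlen1] at key
              exact key
            · -- rise after a plateau: new rise run, no pit (no strict fall before it)
              subst hs
              obtain ⟨hinc, hm, htv, hdec⟩ := hS0 rfl
              subst hinc hdec
              have hst : pvStepA (done ++ prev :: c :: rest') (true, tp, 0, rtn) ((done.length : Int) + 1)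
                  = (true, tp, 0, rtn) := by
                simp only [pvStepA, hAi, hAp, hAtp]
                rw [if_neg hne]
                rw [show decide (prev < c) = true from by simp [hGt]]
                simp only [ne_eq, not_true_eq_false, if_false]
                rw [hAtp, htv]
                have h1 : min (c - prev) 0 = 0 := by omega
                have h2 : max rtn 0 = rtn := by omega
                rw [h1, h2]
              rw [hst]
              have hrc : pvRunStepC ((0, m) :: C') (prev, c) = (1, c - prev) :: (0, m) :: C' := by
                simp [pvRunStepC, hGt, hcp, habs]
              rw [hrc]
              have hnew : pvInv (done ++ [prev]) c true tp 0 rtn ((1, c - prev) :: (0, m) :: C') := by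
                refine ⟨hrtn0, ?_, htp0, le_trans htpLen (by rw [hlen1]; omega), ?_, ?_, ?_, ?_⟩
                · rw [bestRev_cons, show pvBStep (pvBestRev ((0, m) :: C')) ((0, m), (1, c - prev))
                      = pvBestRev ((0, m) :: C') from by simp [pvBStep]]
                  exact hrtnC
                · intro _
                  refine ⟨rfl, by omega, ?_, ?_, le_refl 0⟩
                  · rw [tv_stable done prev c tp htp0 htpLen, htv]; ring
                  · simp [pvFall]
                · intro h; exact absurd h (by norm_num)
                · intro h; exact absurd h (by norm_num)
                · exact Or.inl rfl
              have key := ih (done ++ [prev]) c true tp 0 rtn ((1, c - prev) :: (0, m) :: C') hnew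
              rw [hshape, hlen1] at key
              exact key

-- ===== VERDICT (by name: the statement is the Claim_ definition above) =====
theorem deepest_pit_spec : Claim_equal_deepest_pit := by
  intro A _
  unfold Spec_deepest_pit deepest_pit deepest_pit_alt
  by_cases h3 : ((A.length : Nat) : Int) < 3
  · simp only [if_pos h3]
  · simp only [if_neg h3]
    obtain ⟨a, rest, rfl⟩ : ∃ a rest, A = a :: rest := by
      cases A with
      | nil => exact absurd (by norm_num : ((([] : List Int).length : Nat) : Int) < 3) h3
      | cons a rest => exact ⟨a, rest, rfl⟩
    have hB : ((a :: rest).zip (a :: rest).tail).foldl pvRunStep []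
        = (((a :: rest).zip rest).foldl pvRunStepC []).reverse := by
      rw [show (a :: rest).tail = rest from rfl]
      rw [foldl_runStep_rev]
      rw [List.reverse_nil]
    rw [hB, zipfold_eq_scan]
    have hmain := pvLoop rest [] a true 0 0 0 []
      ⟨le_refl 0, rfl, le_refl 0, by simp, rfl, rfl, rfl, rfl⟩
    simp only [List.nil_append, List.length_nil, Nat.cast_zero, zero_add] at hmain
    rw [hmain]
    unfold pvBestRev
    by_cases hz : pvScan 0 ((((a :: rest).zip rest).foldl pvRunStepC []).reverse) = 0
    · simp [hz]
    · simp [hz]
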